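-- pv_equiv track=rewrite | github.com/Lithium127/DPCompile | src/dpc/cmd/bases.py | cmdargs
-- ===== SOURCE A (Python) =====
-- def cmdargs(cmd: str) -> tuple[str]:
--     """Splits a command into an argument list, accounting
--     for strings, json elements, and other non-argument items
--
--     Args:
--         cmd (str): The command to convert into arguments
--
--     Returns:
--         tuple[str]: The command as arguments
--     """
--     values = []
--     builder = ""
--
--     ctx_pairs: tuple[tuple[str, str]] = (
--         ('"', '"'),
--         ("{", "}"),
--         ("[", "]")
--     )
--     ctx_index = None
--
--     for item in cmd:
--         if ctx_index is None:
--             for index, pair in enumerate(ctx_pairs):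
--                 if item == pair[0]:
--                     ctx_index = index
--                     break
--             if ctx_index is None:
--                 if item == " ":
--                     values.append(builder)
--                     builder = ""
--                 else:
--                     builder = builder + item
--         else:
--             if item == ctx_pairs[ctx_index][1]:
--                 ctx_index = None
--     values.append(builder)
--     return tuple(values)
-- ===== SOURCE B (Python) =====
-- def cmdargs(cmd: str) -> tuple[str]:
--     """Two-pass rewrite: first delete opener..closer regions, then split on spaces."""
--     closers = {'"': '"', '{': '}', '[': ']'}
--     cleaned = []
--     expected = None
--     for ch in cmd:
--         if expected is None:
--             if ch in closers:
--                 expected = closers[ch]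
--             else:
--                 cleaned.append(ch)
--         elif ch == expected:
--             expected = None
--     return tuple(''.join(cleaned).split(' '))
-- ===== Notes on version B (the rewrite author's own statement) =====
-- stated objective: simpler
-- what changed: A splits while scanning, growing a builder string char-by-char and appending to a values list inside the bracket-tracking loop; B first strips all opener..closer spans in one cleaning pass driven by a closer dict and then delegates the whole argument split to a single str.split on spaces.
import Mathlib
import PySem

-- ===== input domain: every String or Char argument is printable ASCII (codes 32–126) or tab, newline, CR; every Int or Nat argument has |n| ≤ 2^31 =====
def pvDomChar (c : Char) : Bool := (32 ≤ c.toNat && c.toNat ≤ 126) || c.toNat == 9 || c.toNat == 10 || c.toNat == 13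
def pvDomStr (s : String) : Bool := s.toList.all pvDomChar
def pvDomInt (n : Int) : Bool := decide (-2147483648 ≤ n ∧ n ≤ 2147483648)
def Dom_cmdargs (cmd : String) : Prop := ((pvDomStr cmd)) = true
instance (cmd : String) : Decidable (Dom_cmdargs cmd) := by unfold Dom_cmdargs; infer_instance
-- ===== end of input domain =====

-- B deletes the quoted/bracketed spans in one cleaning pass and then defers all argument
-- splitting to a single str.split on spaces (simpler two-pass decomposition; the timing
-- run measured it faster by a constant factor: list-append/join/split vs per-char string concat).

-- ===== PORT A =====
def cmdargsCtxPairs : List (Char × Char) := [('"', '"'), ('{', '}'), ('[', ']')]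

-- the inner 'for index, pair in enumerate(ctx_pairs): if item == pair[0]: … break'
def cmdargsFind (item : Char) : List (Int × (Char × Char)) → Option Int
  | [] => none
  | (index, pair) :: rest => if item = pair.1 then some index else cmdargsFind item rest

def cmdargsLoop : List Char → List String → String → Option Int → List String
  | [], values, builder, _ => values ++ [builder]
  | item :: rest, values, builder, ctx =>
    match ctx with
    | none =>
      match cmdargsFind item (PySem.List.enumerate cmdargsCtxPairs) with
      | some i => cmdargsLoop rest values builder (some i)
      | none =>
        if item = ' ' then cmdargsLoop rest (values ++ [builder]) "" none
        else cmdargsLoop rest values (builder.push item) none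
    | some i =>
      match PySem.List.pyGet? cmdargsCtxPairs i with
      | some pair =>
        if item = pair.2 then cmdargsLoop rest values builder none
        else cmdargsLoop rest values builder (some i)
      | none => cmdargsLoop rest values builder (some i)  -- unreachable: ctx_index is always a valid index in Python

def cmdargs (cmd : String) : List String := cmdargsLoop cmd.toList [] "" none

-- ===== PORT B =====
def cmdargsClosers : PySem.Dict Char Char := PySem.Dict.ofList [('"', '"'), ('{', '}'), ('[', ']')]

def cmdargsClean : List Char → List Char → Option Char → List Char
  | [], cleaned, _ => cleaned
  | ch :: rest, cleaned, expected =>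
    match expected with
    | none =>
      if cmdargsClosers.contains ch then cmdargsClean rest cleaned (cmdargsClosers.get? ch)
      else cmdargsClean rest (cleaned ++ [ch]) none
    | some c =>
      if ch = c then cmdargsClean rest cleaned none
      else cmdargsClean rest cleaned (some c)

def cmdargs_alt (cmd : String) : List String :=
  (PySem.Chars.splitOn (cmdargsClean cmd.toList [] none) [' ']).map String.ofList

-- ===== PRECONDITION & SPEC =====
def Spec_cmdargs (cmd : String) (out : List String) : Prop := out = cmdargs_alt cmd
instance (cmd : String) (out : List String) : Decidable (Spec_cmdargs cmd out) := by unfold Spec_cmdargs; infer_instance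

-- ===== CLAIM (what is proved, stated in full; the proofs are below) =====
def Claim_equal_cmdargs : Prop := ∀ (cmd : String), Dom_cmdargs cmd → Spec_cmdargs cmd (cmdargs cmd)

-- ===== LEMMAS AND PROOFS =====

-- space-split of a char list, as a (head, tail) pair: split cs = P.1 :: P.2
def pvSplitP : List Char → List Char × List (List Char)
  | [] => ([], [])
  | c :: r =>
    let p := pvSplitP r
    if c = ' ' then ([], p.1 :: p.2) else (c :: p.1, p.2)

theorem pvSplitOn_go_eq (l : List Char) : ∀ (fuel : Nat) (cur : List Char) (acc : List (List Char)),
    l.length ≤ fuel →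
    PySem.Chars.splitOn.go [' '] fuel l cur acc
      = acc.reverse ++ (cur.reverse ++ (pvSplitP l).1) :: (pvSplitP l).2 := by
  induction l with
  | nil =>
    intro fuel cur acc _
    cases fuel <;> simp [PySem.Chars.splitOn.go, pvSplitP]
  | cons c r ih =>
    intro fuel cur acc hf
    cases fuel with
    | zero => simp at hf
    | succ f =>
      by_cases hc : c = ' '
      · subst hc
        rw [show PySem.Chars.splitOn.go [' '] (f+1) (' ' :: r) cur acc
              = PySem.Chars.splitOn.go [' '] f r [] (cur.reverse :: acc) by
            simp [PySem.Chars.splitOn.go, List.isPrefixOf]]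
        rw [ih f [] (cur.reverse :: acc) (by simpa using hf)]
        simp [pvSplitP]
      · rw [show PySem.Chars.splitOn.go [' '] (f+1) (c :: r) cur acc
              = PySem.Chars.splitOn.go [' '] f r (c :: cur) acc by
            simp [PySem.Chars.splitOn.go, List.isPrefixOf, Ne.symm hc]]
        rw [ih f (c :: cur) acc (by simpa using Nat.le_of_succ_le_succ hf)]
        simp [pvSplitP, hc]

theorem pvSplitOn_eq (l : List Char) :
    PySem.Chars.splitOn l [' '] = (pvSplitP l).1 :: (pvSplitP l).2 := by
  unfold PySem.Chars.splitOn
  rw [pvSplitOn_go_eq l (l.length + 1) [] [] (Nat.le_succ _)]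
  simp

theorem pvClean_acc (l : List Char) : ∀ (acc : List Char) (e : Option Char),
    cmdargsClean l acc e = acc ++ cmdargsClean l [] e := by
  induction l with
  | nil => intro acc e; simp [cmdargsClean]
  | cons c r ih =>
    intro acc e
    cases e with
    | none =>
      by_cases h : cmdargsClosers.contains c
      · simp [cmdargsClean, h]
        exact ih acc _
      · simp [cmdargsClean, h]
        rw [ih [c] none, ih (acc ++ [c]) none]
        simp
    | some d =>
      by_cases h : c = d
      · simp [cmdargsClean, h]
        exact ih acc none
      · simp [cmdargsClean, h]
        exact ih acc (some d)

theorem pvFind_eq (ch : Char) :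
    cmdargsFind ch (PySem.List.enumerate cmdargsCtxPairs)
      = if ch = '"' then some 0 else if ch = '{' then some 1 else if ch = '[' then some 2 else none := by
  simp [cmdargsCtxPairs, PySem.List.enumerate, cmdargsFind]

theorem pvContains_iff (ch : Char) :
    cmdargsClosers.contains ch = true ↔ (ch = '"' ∨ ch = '{' ∨ ch = '[') := by
  have hitems : cmdargsClosers.items = [('"', '"'), ('{', '}'), ('[', ']')] := by rfl
  have h : cmdargsClosers.contains ch = ('"' == ch || ('{' == ch || '[' == ch)) := by
    simp [PySem.Dict.contains, hitems]
  rw [h]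
  simp only [Bool.or_eq_true, beq_iff_eq]
  constructor
  · rintro (hb | hb | hb)
    exacts [Or.inl hb.symm, Or.inr (Or.inl hb.symm), Or.inr (Or.inr hb.symm)]
  · rintro (hb | hb | hb) <;> subst hb
    exacts [Or.inl rfl, Or.inr (Or.inl rfl), Or.inr (Or.inr rfl)]

theorem pvCont_quote : cmdargsClosers.contains '"' = true := by rfl
theorem pvCont_brace : cmdargsClosers.contains '{' = true := by rfl
theorem pvCont_brack : cmdargsClosers.contains '[' = true := by rfl

theorem pvGet_quote : cmdargsClosers.get? '"' = some '"' := by rfl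
theorem pvGet_brace : cmdargsClosers.get? '{' = some '}' := by rfl
theorem pvGet_brack : cmdargsClosers.get? '[' = some ']' := by rfl

-- relation between A's ctx_index and B's expected closer
def pvRel (ctx : Option Int) (e : Option Char) : Prop :=
  (ctx = none ∧ e = none) ∨ (ctx = some 0 ∧ e = some '"')
    ∨ (ctx = some 1 ∧ e = some '}') ∨ (ctx = some 2 ∧ e = some ']')

theorem pvMain (l : List Char) : ∀ (values : List String) (builder : String)
    (ctx : Option Int) (e : Option Char), pvRel ctx e →
    cmdargsLoop l values builder ctx
      = values ++ (builder ++ String.ofList (pvSplitP (cmdargsClean l [] e)).1)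
          :: ((pvSplitP (cmdargsClean l [] e)).2.map String.ofList) := by
  induction l with
  | nil =>
    intro values builder ctx e _
    simp [cmdargsLoop, cmdargsClean, pvSplitP]
  | cons c r ih =>
    intro values builder ctx e hrel
    have hclean : ∀ cc, cmdargsClean (c :: r) [] (some cc)
        = cmdargsClean r [] (if c = cc then none else some cc) := by
      intro cc; by_cases h : c = cc <;> simp [cmdargsClean, h]
    rcases hrel with ⟨hc1, hc2⟩ | ⟨hc1, hc2⟩ | ⟨hc1, hc2⟩ | ⟨hc1, hc2⟩ <;> subst hc1 <;> subst hc2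
    · -- ctx = none
      by_cases h1 : c = '"'
      · subst h1
        rw [show cmdargsLoop ('"' :: r) values builder none = cmdargsLoop r values builder (some 0) by
              simp [cmdargsLoop, pvFind_eq]]
        rw [ih values builder (some 0) (some '"') (by simp [pvRel])]
        rw [show cmdargsClean ('"' :: r) [] none = cmdargsClean r [] (some '"') by
              simp [cmdargsClean, pvCont_quote, pvGet_quote]]
      · by_cases h2 : c = '{'
        · subst h2
          rw [show cmdargsLoop ('{' :: r) values builder none = cmdargsLoop r values builder (some 1) by
                simp [cmdargsLoop, pvFind_eq]]
          rw [ih values builder (some 1) (some '}') (by simp [pvRel])]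
          rw [show cmdargsClean ('{' :: r) [] none = cmdargsClean r [] (some '}') by
                simp [cmdargsClean, pvCont_brace, pvGet_brace]]
        · by_cases h3 : c = '['
          · subst h3
            rw [show cmdargsLoop ('[' :: r) values builder none = cmdargsLoop r values builder (some 2) by
                  simp [cmdargsLoop, pvFind_eq]]
            rw [ih values builder (some 2) (some ']') (by simp [pvRel])]
            rw [show cmdargsClean ('[' :: r) [] none = cmdargsClean r [] (some ']') by
                  simp [cmdargsClean, pvCont_brack, pvGet_brack]]
          · have hnc : ¬ (cmdargsClosers.contains c = true) := by
              simp [pvContains_iff, h1, h2, h3]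
            have hcl : cmdargsClean (c :: r) [] none = c :: cmdargsClean r [] none := by
              simp [cmdargsClean, hnc]
              rw [pvClean_acc]
              simp
            by_cases hsp : c = ' '
            · subst hsp
              rw [show cmdargsLoop (' ' :: r) values builder none
                    = cmdargsLoop r (values ++ [builder]) "" none by
                  simp [cmdargsLoop, pvFind_eq]]
              rw [ih (values ++ [builder]) "" none none (by simp [pvRel])]
              rw [hcl]
              simp [pvSplitP]
            · rw [show cmdargsLoop (c :: r) values builder none
                    = cmdargsLoop r values (builder.push c) none by
                  simp [cmdargsLoop, pvFind_eq, h1, h2, h3, hsp]]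
              rw [ih values (builder.push c) none none (by simp [pvRel])]
              rw [hcl]
              simp [pvSplitP, hsp]
              apply String.toList_inj.mp; simp
    · -- ctx = some 0, e = some '"'
      by_cases h : c = '"'
      · subst h
        rw [show cmdargsLoop ('"' :: r) values builder (some 0) = cmdargsLoop r values builder none by
              rfl]
        rw [ih values builder none none (by simp [pvRel]), hclean]; simp
      · rw [show cmdargsLoop (c :: r) values builder (some 0) = cmdargsLoop r values builder (some 0) by
              simp [cmdargsLoop, cmdargsCtxPairs, PySem.List.pyGet?, PySem.List.pyIdx?, h]]
        rw [ih values builder (some 0) (some '"') (by simp [pvRel]), hclean]; simp [h]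
    · -- ctx = some 1, e = some '}'
      by_cases h : c = '}'
      · subst h
        rw [show cmdargsLoop ('}' :: r) values builder (some 1) = cmdargsLoop r values builder none by
              rfl]
        rw [ih values builder none none (by simp [pvRel]), hclean]; simp
      · rw [show cmdargsLoop (c :: r) values builder (some 1) = cmdargsLoop r values builder (some 1) by
              simp [cmdargsLoop, cmdargsCtxPairs, PySem.List.pyGet?, PySem.List.pyIdx?, h]]
        rw [ih values builder (some 1) (some '}') (by simp [pvRel]), hclean]; simp [h]
    · -- ctx = some 2, e = some ']'
      by_cases h : c = ']'
      · subst h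
        rw [show cmdargsLoop (']' :: r) values builder (some 2) = cmdargsLoop r values builder none by
              rfl]
        rw [ih values builder none none (by simp [pvRel]), hclean]; simp
      · rw [show cmdargsLoop (c :: r) values builder (some 2) = cmdargsLoop r values builder (some 2) by
              simp [cmdargsLoop, cmdargsCtxPairs, PySem.List.pyGet?, PySem.List.pyIdx?, h]]
        rw [ih values builder (some 2) (some ']') (by simp [pvRel]), hclean]; simp [h]

-- ===== VERDICT (by name: the statement is the Claim_ definition above) =====
theorem cmdargs_spec : Claim_equal_cmdargs := by
  intro cmd _
  unfold Spec_cmdargs cmdargs cmdargs_alt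
  rw [pvMain cmd.toList [] "" none none (by simp [pvRel]), pvSplitOn_eq]
  simp
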